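-- pv_equiv track=rewrite | github.com/Kureii/ADFGVX | Fce.py | key2toList
-- ===== SOURCE A (Python) =====
-- def key2toList(key2):
--     myList =[]
--     for i in key2:
--         tmp = 0
--         for j in myList:
--             if i in j:
--                 tmp += 1
--         myList.append(i + str(tmp))
--     return myList
-- ===== SOURCE B (Python) =====
-- def key2toList(key2):
--     # One pass with a per-character containment counter instead of rescanning the list.
--     cnt = {}
--     out = []
--     for i in key2:
--         entry = i + str(cnt.get(i, 0))
--         out.append(entry)
--         for c in set(entry):
--             cnt[c] = cnt.get(c, 0) + 1
--     return out
-- ===== Notes on version B (the rewrite author's own statement) =====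
-- stated objective: faster
-- what changed: Replaces the inner rescan of all previous entries with a dict mapping each character to the number of entries so far that contain it, updated incrementally per appended entry.
import Mathlib
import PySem

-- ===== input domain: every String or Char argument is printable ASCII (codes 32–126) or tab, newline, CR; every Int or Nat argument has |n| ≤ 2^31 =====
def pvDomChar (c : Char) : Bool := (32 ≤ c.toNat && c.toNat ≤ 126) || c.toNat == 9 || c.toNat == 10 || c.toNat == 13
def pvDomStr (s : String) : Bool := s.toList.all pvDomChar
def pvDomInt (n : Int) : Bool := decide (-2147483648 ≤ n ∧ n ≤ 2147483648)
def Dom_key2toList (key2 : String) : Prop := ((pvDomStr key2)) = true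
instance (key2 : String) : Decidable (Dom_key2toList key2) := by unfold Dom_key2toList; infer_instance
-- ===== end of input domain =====

-- B replaces A's inner rescan of all previous entries with a per-character containment
-- counter dict updated once per appended entry (objective: faster; return values identical).

-- ===== PORT A =====
-- for i in key2: tmp = count of previous entries j with i in j; append i + str(tmp)
def key2toList (key2 : String) : List String :=
  key2.toList.foldl
    (fun myList i =>
      let tmp : Int :=
        myList.foldl (fun tmp j => if PySem.Str.isIn (String.ofList [i]) j then tmp + 1 else tmp) 0
      myList ++ [String.ofList (i :: (PySem.Int.toStr tmp).toList)]) []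

-- ===== PORT B =====
-- state = (out, cnt); cnt.get(c,0) = number of entries appended so far containing c
def key2toList_alt (key2 : String) : List String :=
  (key2.toList.foldl
    (fun (st : List String × PySem.Dict Char Int) i =>
      let entryChars : List Char := i :: (PySem.Int.toStr (st.2.getD i 0)).toList
      (st.1 ++ [String.ofList entryChars],
       (PySem.Set.ofList entryChars).foldl (fun d c => d.modify c 0 (· + 1)) st.2))
    ([], PySem.Dict.empty)).1

-- ===== PRECONDITION & SPEC =====
def Spec_key2toList (key2 : String) (out : List String) : Prop := out = key2toList_alt key2
instance (key2 : String) (out : List String) : Decidable (Spec_key2toList key2 out) := by unfold Spec_key2toList; infer_instance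

-- ===== CLAIM (what is proved, stated in full; the proofs are below) =====
def Claim_equal_key2toList : Prop := ∀ (key2 : String), Dom_key2toList key2 → Spec_key2toList key2 (key2toList key2)

-- ===== LEMMAS AND PROOFS =====

-- 'c in j' for a single character c is membership of c in j's characters
theorem pv_isIn_singleton (c : Char) (j : String) :
    PySem.Str.isIn (String.ofList [c]) j = true ↔ c ∈ j.toList := by
  rw [PySem.Str.isIn_iff_infix]
  simp only [String.toList_ofList]
  constructor
  · intro h; exact h.mem (List.mem_singleton_self c)
  · intro h
    obtain ⟨l, r, hlr⟩ := List.append_of_mem h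
    exact ⟨l, r, by simp [hlr]⟩

-- the invariant relating B's counter to A's list of entries
def pvInv (lst : List String) (d : PySem.Dict Char Int) : Prop :=
  ∀ c : Char, d.getD c 0 =
    (lst.countP (fun j => PySem.Str.isIn (String.ofList [c]) j) : Int)

-- count of c in the deduplicated characters of e = the 0/1 'does e contain c'
theorem pv_count_ofList (l : List Char) (c : Char) :
    (PySem.Set.ofList l).count c = if c ∈ l then 1 else 0 := by
  by_cases h : c ∈ l
  · rw [List.count_eq_one_of_mem (PySem.Set.nodup_ofList l)
      ((PySem.Set.mem_ofList l c).mpr h)]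
    simp [h]
  · simp [h, List.count_eq_zero.mpr (fun hm => h ((PySem.Set.mem_ofList l c).mp hm))]

-- the invariant is preserved by appending an entry and bumping its distinct characters
theorem pv_inv_step (lst : List String) (d : PySem.Dict Char Int) (e : List Char)
    (hinv : pvInv lst d) :
    pvInv (lst ++ [String.ofList e]) ((PySem.Set.ofList e).foldl (fun d c => d.modify c 0 (· + 1)) d) := by
  intro c
  rw [PySem.Dict.getD_foldl_modify_add_one, hinv c, pv_count_ofList]
  rw [List.countP_append]
  have hiff := pv_isIn_singleton c (String.ofList e)
  by_cases h : c ∈ e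
  · have hb : PySem.Str.isIn (String.ofList [c]) (String.ofList e) = true :=
      hiff.mpr (by simpa using h)
    simp only [PySem.Str.isIn_eq, String.toList_ofList] at hb
    simp [h, hb]
  · have hb : PySem.Str.isIn (String.ofList [c]) (String.ofList e) = false := by
      cases hb : PySem.Str.isIn (String.ofList [c]) (String.ofList e)
      · rfl
      · exact absurd (hiff.mp hb) (by simpa using h)
    simp only [PySem.Str.isIn_eq, String.toList_ofList] at hb
    simp [h, hb]

-- A's inner loop computes the countP of the invariant
theorem pv_tmp_eq (lst : List String) (i : Char) :
    lst.foldl (fun tmp j => if PySem.Str.isIn (String.ofList [i]) j then tmp + 1 else tmp) (0 : Int)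
      = (lst.countP (fun j => PySem.Str.isIn (String.ofList [i]) j) : Int) := by
  rw [PySem.List.foldl_if_add_one]
  simp only [zero_add]

-- main induction: from any states related by the invariant, the two folds agree
theorem pv_main (cs : List Char) :
    ∀ (lst : List String) (d : PySem.Dict Char Int), pvInv lst d →
      cs.foldl
        (fun myList i =>
          let tmp : Int :=
            myList.foldl (fun tmp j => if PySem.Str.isIn (String.ofList [i]) j then tmp + 1 else tmp) 0
          myList ++ [String.ofList (i :: (PySem.Int.toStr tmp).toList)]) lst
      = (cs.foldl
          (fun (st : List String × PySem.Dict Char Int) i =>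
            let entryChars : List Char := i :: (PySem.Int.toStr (st.2.getD i 0)).toList
            (st.1 ++ [String.ofList entryChars],
             (PySem.Set.ofList entryChars).foldl (fun d c => d.modify c 0 (· + 1)) st.2))
          (lst, d)).1 := by
  induction cs with
  | nil => intro lst d _; rfl
  | cons i rest ih =>
    intro lst d hinv
    have htmp :
        lst.foldl (fun tmp j => if PySem.Str.isIn (String.ofList [i]) j then tmp + 1 else tmp) (0 : Int)
          = d.getD i 0 := by
      rw [pv_tmp_eq, hinv i]
    simp only [List.foldl_cons, htmp]
    exact ih _ _ (pv_inv_step lst d _ hinv)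

-- ===== VERDICT (by name: the statement is the Claim_ definition above) =====
theorem key2toList_spec : Claim_equal_key2toList := by
  intro key2 _
  unfold Spec_key2toList key2toList key2toList_alt
  exact pv_main key2.toList [] PySem.Dict.empty (fun c => by simp)
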